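-- pv_equiv track=rewrite | github.com/Gendo90/topCoder | 400-600 pts/topcoderTwain.py | yearThree
-- ===== SOURCE A (Python) =====
-- def yearThree(words):
--     newWords = []
--     words = words.split(" ")
--     for word in words:
--         this_word = [a for a in word]
--         for i, letter in enumerate(word):
--             if(letter=="c"):
--                 if(i+1<len(word) and (word[i+1]=="e" or word[i+1]=="i")):
--                     this_word[i] = "s"
--         this_word = "".join(a for a in this_word)
--         newWords.append(this_word)
--     words = " ".join(newWords)
--     return words
-- ===== SOURCE B (Python) =====
-- def yearThree(words):
--     out = []
--     for cur, nxt in zip(words, words[1:] + " "):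
--         out.append("s" if cur == "c" and (nxt == "e" or nxt == "i") else cur)
--     return "".join(out)
-- ===== Notes on version B (the rewrite author's own statement) =====
-- stated objective: simpler
-- what changed: Replaces the split-on-space / per-word index-scan / rejoin pipeline with one linear pass over the whole string that rewrites each 'c' whose successor character is 'e' or 'i' (a word-final 'c' is followed by a space or nothing, so word boundaries need no special handling).
import Mathlib
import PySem

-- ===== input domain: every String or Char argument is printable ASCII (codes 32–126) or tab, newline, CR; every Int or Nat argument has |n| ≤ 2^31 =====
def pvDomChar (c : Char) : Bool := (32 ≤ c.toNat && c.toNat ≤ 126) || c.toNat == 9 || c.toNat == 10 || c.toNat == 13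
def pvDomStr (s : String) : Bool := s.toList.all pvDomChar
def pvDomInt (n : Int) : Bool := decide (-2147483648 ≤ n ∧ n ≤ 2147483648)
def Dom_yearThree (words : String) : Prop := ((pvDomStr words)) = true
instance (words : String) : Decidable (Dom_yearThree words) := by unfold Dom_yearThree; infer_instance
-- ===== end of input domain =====

-- B replaces A's split/per-word-scan/rejoin pipeline with one linear pass over the whole
-- string, rewriting each 'c' whose successor is 'e'/'i' (objective: simpler).

-- ===== PORT A =====
-- the body of A's inner loop: if letter=="c" and i+1<len(word) and word[i+1] in "ei": this_word[i]="s"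
def yearThreeStep (word : List Char) (tw : List Char) (p : Int × Char) : List Char :=
  if p.2 = 'c' then
    if p.1 + 1 < PySem.List.len word ∧
        (PySem.List.pyGetD word (p.1 + 1) ' ' = 'e' ∨ PySem.List.pyGetD word (p.1 + 1) ' ' = 'i')
    then PySem.List.pySetD tw p.1 's'
    else tw
  else tw

-- A's per-word pass: this_word = list(word); for i, letter in enumerate(word): …
def yearThreeWordPass (word : List Char) : List Char :=
  (PySem.List.enumerate word 0).foldl (yearThreeStep word) word

def yearThree (words : String) : String :=
  let ws := PySem.Chars.splitOn words.toList [' ']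
  let newWords := ws.foldl (fun acc w => acc ++ [yearThreeWordPass w]) []
  String.mk (PySem.Chars.join [' '] newWords)

-- ===== PORT B =====
def yearThree_alt (words : String) : String :=
  let L := words.toList
  String.mk ((L.zip (L.drop 1 ++ [' '])).foldl
    (fun out p => out ++ [if p.1 = 'c' ∧ (p.2 = 'e' ∨ p.2 = 'i') then 's' else p.1]) [])

-- ===== PRECONDITION & SPEC =====
def Spec_yearThree (words : String) (out : String) : Prop := out = yearThree_alt words
instance (words : String) (out : String) : Decidable (Spec_yearThree words out) := by unfold Spec_yearThree; infer_instance

-- ===== CLAIM (what is proved, stated in full; the proofs are below) =====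
def Claim_equal_yearThree : Prop := ∀ (words : String), Dom_yearThree words → Spec_yearThree words (yearThree words)

-- ===== LEMMAS AND PROOFS =====

-- the per-character rewrite both programs perform
def pvF (c n : Char) : Char := if c = 'c' ∧ (n = 'e' ∨ n = 'i') then 's' else c

-- B's pass, as a map
def pvG (L : List Char) : List Char := (L.zip (L.drop 1 ++ [' '])).map (fun p => pvF p.1 p.2)

theorem pvG_cons (c : Char) (t : List Char) :
    pvG (c :: t) = pvF c (t.headD ' ') :: pvG t := by
  cases t <;> simp [pvG]

-- structural version of str.split(" ")
def pvSp : List Char → List (List Char)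
  | [] => [[]]
  | c :: t => if c = ' ' then [] :: pvSp t else (c :: (pvSp t).headD []) :: (pvSp t).tail

theorem pvSp_ne_nil (L : List Char) : pvSp L ≠ [] := by
  cases L with
  | nil => simp [pvSp]
  | cons c t => simp only [pvSp]; split <;> simp

theorem pvSp_cons_eq (L : List Char) : pvSp L = (pvSp L).headD [] :: (pvSp L).tail := by
  cases h : pvSp L with
  | nil => exact absurd h (pvSp_ne_nil L)
  | cons a r => simp

theorem pvSp_space (t : List Char) : pvSp (' ' :: t) = [] :: pvSp t := by
  simp [pvSp]

theorem pvSp_char (c : Char) (t : List Char) (hc : c ≠ ' ') :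
    pvSp (c :: t) = (c :: (pvSp t).headD []) :: (pvSp t).tail := by
  simp [pvSp, hc]

theorem splitOn_go_spec :
    ∀ (fuel : Nat) (l cur : List Char) (accs : List (List Char)),
      l.length ≤ fuel →
      PySem.Chars.splitOn.go [' '] fuel l cur accs =
        accs.reverse ++ ((cur.reverse ++ (pvSp l).headD []) :: (pvSp l).tail) := by
  intro fuel
  induction fuel with
  | zero =>
    intro l cur accs h
    have hl : l = [] := List.length_eq_zero_iff.mp (Nat.le_zero.mp h)
    subst hl
    simp [PySem.Chars.splitOn.go, pvSp]
  | succ n ih =>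
    intro l cur accs h
    cases l with
    | nil => simp [PySem.Chars.splitOn.go, pvSp]
    | cons c rest =>
      simp only [PySem.Chars.splitOn.go]
      by_cases hc : c = ' '
      · subst hc
        have hpre : ([' '] : List Char).isPrefixOf (' ' :: rest) = true := by
          simp [List.isPrefixOf]
        rw [if_pos hpre]
        have hrec := ih rest [] (cur.reverse :: accs) (by simpa using Nat.le_of_succ_le_succ h)
        simp only [List.length_cons, List.length_nil, List.drop_succ_cons, List.drop_zero]
        rw [hrec, pvSp_space, pvSp_cons_eq rest]
        simp
      · have hpre : ([' '] : List Char).isPrefixOf (c :: rest) = false := by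
          simp [List.isPrefixOf]
          exact fun h' => hc (h'.symm)
        rw [if_neg (by simp [hpre])]
        rw [ih rest (c :: cur) accs (by simpa using Nat.le_of_succ_le_succ h)]
        rw [pvSp_char c rest hc]
        simp

theorem splitOn_eq_pvSp (L : List Char) : PySem.Chars.splitOn L [' '] = pvSp L := by
  show PySem.Chars.splitOn.go [' '] (L.length + 1) L [] [] = pvSp L
  rw [splitOn_go_spec (L.length + 1) L [] [] (Nat.le_succ _)]
  simpa using (pvSp_cons_eq L).symm

-- head of the first split piece = head of the string (with ' ' as default on both sides)
theorem pvSp_head_head (t : List Char) :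
    ((pvSp t).headD []).headD ' ' = t.headD ' ' := by
  cases t with
  | nil => simp [pvSp]
  | cons d t' =>
    simp only [pvSp]
    by_cases hd : d = ' ' <;> simp [hd]

-- pointwise cons lemmas for the PySem primitives used by A's inner loop
theorem pyGetD_cons_succ (c : Char) (W : List Char) (i : Int) (hi : 0 ≤ i) (d : Char) :
    PySem.List.pyGetD (c :: W) (i + 1) d = PySem.List.pyGetD W i d := by
  simp only [PySem.List.pyGetD, PySem.List.pyGet?, PySem.List.pyIdx?]
  rw [if_pos (by omega : (0:Int) ≤ i + 1), if_pos hi]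
  have ht : (i + 1).toNat = i.toNat + 1 := by omega
  by_cases hlt : i < (W.length : Int)
  · rw [if_pos (by simp; omega), if_pos hlt, ht]; simp
  · rw [if_neg (by simp; omega), if_neg hlt]; simp

theorem pySetD_cons_succ (x : Char) (tw : List Char) (i : Int) (hi : 0 ≤ i) (v : Char) :
    PySem.List.pySetD (x :: tw) (i + 1) v = x :: PySem.List.pySetD tw i v := by
  rw [PySem.List.pySetD_of_nonneg _ _ (by omega), PySem.List.pySetD_of_nonneg _ _ hi]
  have ht : (i + 1).toNat = i.toNat + 1 := by omega
  rw [ht]; simp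

theorem yearThreeStep_shift (c : Char) (W : List Char) (i : Int) (hi : 0 ≤ i)
    (a x : Char) (tw : List Char) :
    yearThreeStep (c :: W) (x :: tw) (i + 1, a) = x :: yearThreeStep W tw (i, a) := by
  unfold yearThreeStep
  have hlen : PySem.List.len (c :: W) = PySem.List.len W + 1 := by simp [PySem.List.len]
  have hget : PySem.List.pyGetD (c :: W) (i + 1 + 1) ' ' = PySem.List.pyGetD W (i + 1) ' ' :=
    pyGetD_cons_succ c W (i + 1) (by omega) ' '
  by_cases ha : a = 'c'
  · rw [if_pos ha, if_pos ha, hlen, hget]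
    have harith : (i + 1 + 1 < PySem.List.len W + 1) ↔ (i + 1 < PySem.List.len W) := by omega
    by_cases hcond : (i + 1 < PySem.List.len W ∧
        (PySem.List.pyGetD W (i + 1) ' ' = 'e' ∨ PySem.List.pyGetD W (i + 1) ' ' = 'i'))
    · rw [if_pos ⟨harith.mpr hcond.1, hcond.2⟩, if_pos hcond]
      exact pySetD_cons_succ x tw i hi 's'
    · rw [if_neg (fun h => hcond ⟨harith.mp h.1, h.2⟩), if_neg hcond]
  · rw [if_neg ha, if_neg ha]

-- A's inner loop shifted by one position: the head survives, indices shift down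
theorem wordPass_shift (c : Char) (W : List Char) :
    ∀ (w : List Char) (k : Int), 0 ≤ k → ∀ (x : Char) (tw : List Char),
      (PySem.List.enumerate w (k + 1)).foldl (yearThreeStep (c :: W)) (x :: tw)
      = x :: (PySem.List.enumerate w k).foldl (yearThreeStep W) tw := by
  intro w
  induction w with
  | nil => intro k hk x tw; simp [PySem.List.enumerate]
  | cons a w' ih =>
    intro k hk x tw
    rw [PySem.List.enumerate_cons, PySem.List.enumerate_cons, List.foldl_cons, List.foldl_cons]
    rw [yearThreeStep_shift c W k hk a x tw]
    exact ih (k + 1) (by omega) x _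

theorem wordPass_nil : yearThreeWordPass [] = [] := rfl

theorem wordPass_cons (c : Char) (w : List Char) :
    yearThreeWordPass (c :: w) = pvF c (w.headD ' ') :: yearThreeWordPass w := by
  unfold yearThreeWordPass
  rw [PySem.List.enumerate_cons, List.foldl_cons]
  have hstep : yearThreeStep (c :: w) (c :: w) (0, c) = pvF c (w.headD ' ') :: w := by
    unfold yearThreeStep
    have hget1 : PySem.List.pyGetD (c :: w) ((0 : Int) + 1) ' ' = w.headD ' ' := by
      rw [pyGetD_cons_succ c w 0 le_rfl ' ']
      cases w <;> simp [PySem.List.pyGetD, PySem.List.pyGet?, PySem.List.pyIdx?]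
    have hlen : PySem.List.len (c :: w) = (w.length : Int) + 1 := by simp [PySem.List.len]
    rw [hget1, hlen]
    cases w with
    | nil =>
      have hlt : ¬ ((0 : Int) + 1 < (([] : List Char).length : Int) + 1) := by simp
      by_cases hc : c = 'c'
      · rw [if_pos hc, if_neg (fun h => hlt h.1)]
        simp only [pvF]
        rw [if_neg (by rintro ⟨_, h | h⟩ <;> simp at h)]
      · rw [if_neg hc]; simp [pvF, hc]
    | cons d w' =>
      have hd : (d :: w').headD ' ' = d := rfl
      have hlt : ((0 : Int) + 1 < ((d :: w').length : Int) + 1) := by simp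
      rw [hd]
      by_cases hc : c = 'c'
      · by_cases he : d = 'e' ∨ d = 'i'
        · rw [if_pos hc, if_pos ⟨hlt, he⟩]
          rw [PySem.List.pySetD_of_nonneg _ _ le_rfl]
          simp [pvF, hc, he]
        · rw [if_pos hc, if_neg (fun h => he h.2)]
          simp [pvF, hc, he]
      · rw [if_neg hc]; simp [pvF, hc]
  rw [hstep]
  exact wordPass_shift c w w 0 le_rfl (pvF c (w.headD ' ')) w

-- join of a word-headed list peels the word's first char
theorem join_cons_head (x : Char) (xs : List Char) (rest : List (List Char)) :
    PySem.Chars.join [' '] ((x :: xs) :: rest) = x :: PySem.Chars.join [' '] (xs :: rest) := by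
  cases rest with
  | nil => simp [PySem.Chars.join_singleton]
  | cons q r => rw [PySem.Chars.join_cons_cons, PySem.Chars.join_cons_cons]; simp

-- A's split-map-join equals B's single pass, by induction on the string
theorem join_map_wordPass (L : List Char) :
    PySem.Chars.join [' '] ((pvSp L).map yearThreeWordPass) = pvG L := by
  induction L with
  | nil => simp [pvSp, pvG, wordPass_nil, PySem.Chars.join_singleton]
  | cons c t ih =>
    by_cases hc : c = ' '
    · subst hc
      rw [pvSp_space, List.map_cons, wordPass_nil]
      rw [pvSp_cons_eq t, List.map_cons] at ih ⊢
      rw [PySem.Chars.join_cons_cons]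
      rw [show ([] ++ [' '] : List Char) = [' '] from rfl] -- join ([] :: …) prepends just the space
      rw [show ([' '] : List Char) ++ PySem.Chars.join [' ']
            (yearThreeWordPass ((pvSp t).headD []) :: (pvSp t).tail.map yearThreeWordPass)
          = ' ' :: PySem.Chars.join [' ']
            (yearThreeWordPass ((pvSp t).headD []) :: (pvSp t).tail.map yearThreeWordPass) from rfl]
      rw [ih, pvG_cons]
      simp [pvF]
    · rw [pvSp_char c t hc, List.map_cons, wordPass_cons]
      rw [pvSp_cons_eq t, List.map_cons] at ih
      rw [join_cons_head, ih, pvG_cons, pvSp_head_head]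

-- ===== VERDICT (by name: the statement is the Claim_ definition above) =====
theorem yearThree_spec : Claim_equal_yearThree := by
  intro words _
  unfold Spec_yearThree yearThree yearThree_alt
  simp only [PySem.List.foldl_append_singleton_eq_map, List.nil_append]
  rw [splitOn_eq_pvSp, join_map_wordPass]
  rfl
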